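-- pv_equiv track=rewrite | github.com/bubje/aoc-2020 | 10/python-10.py | longestWalk
-- ===== SOURCE A (Python) =====
-- def longestWalk(numbers):
-- 	oneD = 0
-- 	threeD = 0
-- 	prev = 0
-- 	for i in numbers:
-- 		if i - prev == 1:
-- 			oneD += 1
-- 		elif i - prev == 3:
-- 			threeD += 1
-- 		prev = i
--
-- 	return oneD, threeD
-- ===== SOURCE B (Python) =====
-- def longestWalk(numbers):
-- 	def gaps(prev, seg):
-- 		if not seg:
-- 			return 0, 0
-- 		if len(seg) == 1:
-- 			d = seg[0] - prev
-- 			return (1 if d == 1 else 0), (1 if d == 3 else 0)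
-- 		m = len(seg) // 2
-- 		l1, l3 = gaps(prev, seg[:m])
-- 		r1, r3 = gaps(seg[m - 1], seg[m:])
-- 		return l1 + r1, l3 + r3
-- 	return gaps(0, numbers)
-- ===== Notes on version B (the rewrite author's own statement) =====
-- stated objective: alternative
-- what changed: Replaces A's single left-to-right accumulator scan with a divide-and-conquer recursion: split the list in half, count gaps in each half independently (the right half seeded with the left half's last element as its predecessor), and add the component counts.
import Mathlib
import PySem

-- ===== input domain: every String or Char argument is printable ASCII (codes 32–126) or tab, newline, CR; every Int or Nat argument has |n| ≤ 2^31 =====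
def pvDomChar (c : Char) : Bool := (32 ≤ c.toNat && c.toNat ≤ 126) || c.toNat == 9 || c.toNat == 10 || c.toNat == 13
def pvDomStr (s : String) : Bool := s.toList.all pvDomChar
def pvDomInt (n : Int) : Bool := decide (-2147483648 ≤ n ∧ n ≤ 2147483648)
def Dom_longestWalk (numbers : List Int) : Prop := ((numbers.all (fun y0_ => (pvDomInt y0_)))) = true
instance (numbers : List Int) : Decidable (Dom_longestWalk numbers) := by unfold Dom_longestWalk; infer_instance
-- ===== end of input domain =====

-- B replaces A's single left-to-right accumulator scan with a divide-and-conquer recursion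
-- over halves of the list (objective: alternative algorithm, same exact result).


-- ===== PORT A =====
-- A's loop: state (oneD, threeD, prev), if/elif on i - prev.
def longestWalkStep (st : Int × Int × Int) (i : Int) : Int × Int × Int :=
  let (oneD, threeD, prev) := st
  if i - prev == 1 then (oneD + 1, threeD, i)
  else if i - prev == 3 then (oneD, threeD + 1, i)
  else (oneD, threeD, i)

def longestWalk (numbers : List Int) : Int × Int :=
  let st := numbers.foldl longestWalkStep (0, 0, 0)
  (st.1, st.2.1)

-- ===== PORT B =====
-- gaps(prev, seg): empty / singleton base cases, otherwise split at m = len(seg)//2,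
-- recurse on seg[:m] with prev and on seg[m:] with seg[m-1], add the counts.
-- (seg[m-1] is ported as seg.getD (m-1) 0: m ≥ 1 here, so the index is nonnegative and in range.)
def lwGaps (prev : Int) (seg : List Int) : Int × Int :=
  if h0 : seg = [] then (0, 0)
  else if h1 : seg.length = 1 then
    let d := seg.getD 0 0 - prev
    ((if d = 1 then 1 else 0), (if d = 3 then 1 else 0))
  else
    let m := seg.length / 2
    let l := lwGaps prev (seg.take m)
    let r := lwGaps (seg.getD (m - 1) 0) (seg.drop m)
    (l.1 + r.1, l.2 + r.2)
termination_by seg.length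
decreasing_by
  all_goals
    have hpos : 0 < seg.length := List.length_pos_of_ne_nil h0
    simp only [List.length_take, List.length_drop]
    omega

def longestWalk_alt (numbers : List Int) : Int × Int :=
  lwGaps 0 numbers

-- ===== PRECONDITION & SPEC =====
def Spec_longestWalk (numbers : List Int) (out : Int × Int) : Prop := out = longestWalk_alt numbers
instance (numbers : List Int) (out : Int × Int) : Decidable (Spec_longestWalk numbers out) := by unfold Spec_longestWalk; infer_instance

-- ===== CLAIM (what is proved, stated in full; the proofs are below) =====
def Claim_equal_longestWalk : Prop := ∀ (numbers : List Int), Dom_longestWalk numbers → Spec_longestWalk numbers (longestWalk numbers)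

-- ===== LEMMAS AND PROOFS =====

-- reference count function: gap counts of prev::xs, defined by plain structural recursion
def lwRef (prev : Int) : List Int → Int × Int
  | [] => (0, 0)
  | x :: xs =>
    let r := lwRef x xs
    (r.1 + (if x - prev = 1 then 1 else 0), r.2 + (if x - prev = 3 then 1 else 0))

theorem lwRef_append (l r : List Int) : ∀ prev : Int,
    lwRef prev (l ++ r) =
      ((lwRef prev l).1 + (lwRef (l.getLastD prev) r).1,
       (lwRef prev l).2 + (lwRef (l.getLastD prev) r).2) := by
  induction l with
  | nil => intro prev; simp [lwRef]
  | cons x xs ih =>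
    intro prev
    simp only [List.cons_append, lwRef, ih x, List.getLastD_cons]
    ring_nf

theorem lwFold_eq (numbers : List Int) : ∀ (o t p : Int),
    numbers.foldl longestWalkStep (o, t, p) =
      (o + (lwRef p numbers).1, t + (lwRef p numbers).2, numbers.getLastD p) := by
  induction numbers with
  | nil => intro o t p; simp [lwRef]
  | cons x xs ih =>
    intro o t p
    simp only [List.foldl_cons, longestWalkStep, lwRef, List.getLastD_cons]
    split_ifs with h1 h3 <;> rw [ih] <;> simp_all <;> ring_nf

theorem getLastD_take (seg : List Int) : ∀ (m : Nat) (p : Int), 1 ≤ m → m ≤ seg.length →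
    (seg.take m).getLastD p = seg.getD (m - 1) 0 := by
  induction seg with
  | nil => intro m p h1 h2; simp at h2; omega
  | cons x xs ih =>
    intro m p h1 h2
    match m, h1 with
    | 1, _ => simp [List.getLastD]
    | (n+2), _ =>
      simp only [List.take_succ_cons, List.getLastD_cons]
      have := ih (n + 1) x (by omega) (by simpa using h2)
      simpa using this

theorem lwGaps_eq_ref (n : Nat) : ∀ (seg : List Int), seg.length ≤ n → ∀ prev : Int,
    lwGaps prev seg = lwRef prev seg := by
  induction n with
  | zero =>
    intro seg h prev
    have : seg = [] := by cases seg <;> simp_all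
    subst this; simp [lwGaps, lwRef]
  | succ n ih =>
    intro seg h prev
    rw [lwGaps]
    by_cases h0 : seg = []
    · subst h0; simp [lwRef]
    · by_cases h1 : seg.length = 1
      · match seg, h1 with
        | [x], _ => simp [lwRef]
      · rw [dif_neg h0, dif_neg h1]
        have hlen : 2 ≤ seg.length := by
          have hpos := List.length_pos_of_ne_nil h0
          omega
        set m := seg.length / 2 with hm
        have hm1 : 1 ≤ m := by rw [hm]; omega
        have hmlt : m < seg.length := by rw [hm]; omega
        have htake : (seg.take m).length ≤ n := by
          simp [List.length_take]; omega
        have hdrop : (seg.drop m).length ≤ n := by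
          simp [List.length_drop]; omega
        dsimp only
        rw [ih _ htake, ih _ hdrop]
        have hsplit := List.take_append_drop m seg
        conv_rhs => rw [← hsplit]
        rw [lwRef_append]
        rw [getLastD_take seg m prev hm1 (by omega)]

-- ===== VERDICT (by name: the statement is the Claim_ definition above) =====
theorem longestWalk_spec : Claim_equal_longestWalk := by
  intro numbers _
  unfold Spec_longestWalk longestWalk longestWalk_alt
  rw [lwFold_eq, lwGaps_eq_ref numbers.length numbers le_rfl]
  simp
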